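-- pv_equiv track=rewrite | github.com/Zeed80/ai-docs | backend/app/api/ai_settings.py | _pick_first_installed
-- ===== SOURCE A (Python) =====
-- def _pick_first_installed(
--     installed: set[str],
--     preferred: list[str],
--     fallback: str | None = None,
-- ) -> str | None:
--     aliases = installed | {name.removesuffix(":latest") for name in installed}
--     for model in preferred:
--         if model in aliases:
--             return model
--     return fallback
-- ===== SOURCE B (Python) =====
-- def _pick_first_installed(
--     installed: set[str],
--     preferred: list[str],
--     fallback: str | None = None,
-- ) -> str | None:
--     pos = {}
--     for i, model in enumerate(preferred):
--         pos.setdefault(model, i)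
--     n = len(preferred)
--     best = min(
--         (min(pos.get(name, n), pos.get(name.removesuffix(":latest"), n))
--          for name in installed),
--         default=n,
--     )
--     return preferred[best] if best < n else fallback
-- ===== Notes on version B (the rewrite author's own statement) =====
-- stated objective: alternative
-- what changed: Instead of building an alias set and scanning preferred for the first hit, B indexes preferred once (first-occurrence position dict), then takes the minimum position reachable from any installed name or its ':latest'-stripped form and returns preferred[best].
import Mathlib
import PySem

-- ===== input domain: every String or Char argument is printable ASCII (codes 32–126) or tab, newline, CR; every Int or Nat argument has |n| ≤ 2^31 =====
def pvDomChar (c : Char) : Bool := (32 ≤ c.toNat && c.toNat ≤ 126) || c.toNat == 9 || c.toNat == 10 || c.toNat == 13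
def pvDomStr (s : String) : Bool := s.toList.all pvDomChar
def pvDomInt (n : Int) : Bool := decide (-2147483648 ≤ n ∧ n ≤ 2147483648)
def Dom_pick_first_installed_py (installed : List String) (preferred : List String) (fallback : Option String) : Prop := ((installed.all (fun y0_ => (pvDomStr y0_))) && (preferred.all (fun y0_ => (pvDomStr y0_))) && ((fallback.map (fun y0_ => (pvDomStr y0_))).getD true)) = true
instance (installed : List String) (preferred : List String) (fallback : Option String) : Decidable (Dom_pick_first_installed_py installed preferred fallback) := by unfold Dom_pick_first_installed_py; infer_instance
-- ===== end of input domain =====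

-- B replaces A's alias-set-then-scan with the reverse decomposition: index preferred once by
-- first-occurrence position, take the minimum position reachable from installed, return preferred[best]
-- (objective: alternative).
-- ===== PORT A =====
-- name.removesuffix(":latest"): drop the suffix iff present ("latest".length = 7)
def pvStripLatest (s : String) : String :=
  if PySem.Str.endswith s ":latest" then String.ofList (s.toList.take (s.toList.length - 7)) else s

-- the for-loop of A: first model found in aliases, else fallback
def pvALoop (aliases : PySem.Set String) (preferred : List String) (fallback : Option String) : Option String :=
  match preferred with
  | [] => fallback
  | m :: rest => if PySem.Set.contains aliases m then some m else pvALoop aliases rest fallback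

def pick_first_installed_py (installed : List String) (preferred : List String) (fallback : Option String) : Option String :=
  let aliases := PySem.Set.union installed (installed.map pvStripLatest)
  pvALoop aliases preferred fallback

-- ===== PORT B =====
-- pos = first-occurrence index of every model in preferred (the setdefault loop of Source B)
def pick_first_installed_py_alt (installed : List String) (preferred : List String) (fallback : Option String) : Option String :=
  let pos := (PySem.List.enumerate preferred 0).foldl
      (fun d q => d.setdefault q.2 q.1) (PySem.Dict.empty : PySem.Dict String Int)
  let n : Int := preferred.length
  -- min over the set 'installed' of an Int-valued expression: order-independent
  let best := PySem.List.minD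
      (installed.map (fun name => min (pos.getD name n) (pos.getD (pvStripLatest name) n)))
      (fun x => x) n
  -- preferred[best] with 0 ≤ best < n: pyGetD never takes its default here
  if best < n then some (PySem.List.pyGetD preferred best "") else fallback

-- ===== PRECONDITION & SPEC =====
def Spec_pick_first_installed_py (installed : List String) (preferred : List String) (fallback : Option String) (out : Option String) : Prop := out = pick_first_installed_py_alt installed preferred fallback
instance (installed : List String) (preferred : List String) (fallback : Option String) (out : Option String) : Decidable (Spec_pick_first_installed_py installed preferred fallback out) := by unfold Spec_pick_first_installed_py; infer_instance

-- ===== CLAIM (what is proved, stated in full; the proofs are below) =====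
def Claim_equal_pick_first_installed_py : Prop := ∀ (installed : List String) (preferred : List String) (fallback : Option String), Dom_pick_first_installed_py installed preferred fallback → Spec_pick_first_installed_py installed preferred fallback (pick_first_installed_py installed preferred fallback)

-- ===== LEMMAS AND PROOFS =====
-- the test both programs decide per model: installed directly, or via the ':latest' alias
def pvQ (installed : List String) (m : String) : Bool :=
  installed.contains m || installed.contains (m ++ ":latest")

-- first-occurrence index of x in p, defaulting to p.length, as an Int
def pvIdxD (p : List String) (x : String) : Int :=
  ((PySem.List.index? p x).map (fun k => (k : Int))).getD p.length

-- stripping the suffix off m ++ ":latest" gives back m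
theorem pvStrip_append (m : String) : pvStripLatest (m ++ ":latest") = m := by
  have hsuf : PySem.Str.endswith (m ++ ":latest") ":latest" = true := by
    simp [PySem.Str.endswith_eq, PySem.Chars.endswith_iff]
  simp only [pvStripLatest, hsuf, if_pos]
  have h1 : (m ++ ":latest").toList = m.toList ++ ":latest".toList := by simp
  rw [h1]
  simp

-- the only preimages of m under pvStripLatest are m itself and m ++ ":latest"
theorem pvStrip_eq (n m : String) (h : pvStripLatest n = m) :
    n = m ∨ n = m ++ ":latest" := by
  cases hs : PySem.Str.endswith n ":latest" with
  | false =>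
      left
      have hs' : PySem.Chars.endswith n.toList [':', 'l', 'a', 't', 'e', 's', 't'] = false := by
        simpa [PySem.Str.endswith_eq] using hs
      simp [pvStripLatest, PySem.Str.endswith_eq, hs'] at h
      exact h
  | true =>
      right
      rw [PySem.Str.endswith_eq, PySem.Chars.endswith_iff] at hs
      obtain ⟨t, ht⟩ := hs
      simp only [pvStripLatest, PySem.Str.endswith_eq, PySem.Chars.endswith_iff] at h
      rw [if_pos ⟨t, ht⟩] at h
      have hlist : n.toList = t ++ ":latest".toList := ht.symm
      rw [hlist] at h
      simp at h
      apply String.toList_injective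
      rw [hlist, ← h]
      simp

-- A's membership test in the alias set equals the two-part test pvQ
theorem pv_cond_eq (installed : List String) (m : String) :
    PySem.Set.contains (PySem.Set.union installed (installed.map pvStripLatest)) m
      = pvQ installed m := by
  rw [Bool.eq_iff_iff]
  simp only [pvQ, PySem.Set.contains_iff, PySem.Set.mem_union, List.mem_map, Bool.or_eq_true,
    List.contains_eq_mem, decide_eq_true_eq]
  constructor
  · rintro (h | ⟨n, hn, hstrip⟩)
    · exact Or.inl h
    · rcases pvStrip_eq n m hstrip with rfl | rfl
      · exact Or.inl hn
      · exact Or.inr hn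
  · rintro (h | h)
    · exact Or.inl h
    · exact Or.inr ⟨m ++ ":latest", h, pvStrip_append m⟩

-- A's scan returns preferred[findIdx pvQ] when a model passes, else the fallback
theorem pvALoop_eq (installed : List String) (p : List String) (f : Option String) :
    pvALoop (PySem.Set.union installed (installed.map pvStripLatest)) p f
      = if h : p.findIdx (pvQ installed) < p.length then some p[p.findIdx (pvQ installed)] else f := by
  induction p with
  | nil => simp [pvALoop]
  | cons m rest ih =>
      simp only [pvALoop, pv_cond_eq]
      cases hq : pvQ installed m with
      | true => simp [List.findIdx_cons, hq]
      | false =>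
          rw [ih]
          simp only [List.findIdx_cons, hq, cond_false]
          by_cases h : rest.findIdx (pvQ installed) < rest.length
          · rw [dif_pos h, dif_pos (by simpa using Nat.succ_lt_succ h)]
            simp
          · rw [dif_neg h, dif_neg (by simpa using fun hh => h (Nat.lt_of_succ_lt_succ hh))]
            simp

-- the setdefault loop: lookup = existing entry, else first-occurrence index offset by the start
theorem pvPos_get? (p : List String) (s : Int) (d : PySem.Dict String Int) (x : String) :
    ((PySem.List.enumerate p s).foldl (fun d q => d.setdefault q.2 q.1) d).get? x
      = (d.get? x).or ((PySem.List.index? p x).map (fun k => s + (k : Int))) := by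
  induction p generalizing s d with
  | nil =>
      simp [PySem.List.enumerate_nil, PySem.List.index?_eq_idxOf?]
  | cons m rest ih =>
      rw [PySem.List.enumerate_cons]
      simp only [List.foldl_cons]
      rw [ih]
      by_cases hx : x = m
      · subst hx
        rw [PySem.Dict.get?_setdefault_self, PySem.List.index?_cons_self]
        cases d.get? x <;> simp
      · rw [PySem.Dict.get?_setdefault_of_ne _ _ hx,
            PySem.List.index?_cons_of_ne _ (fun hh => hx hh.symm)]
        cases PySem.List.index? rest x with
        | none => simp
        | some k =>
            have h3 : s + (((k : Nat) : Int) + 1) = s + 1 + ((k : Nat) : Int) := by ring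
            simp [h3]

theorem pvPos_getD (p : List String) (x : String) :
    ((PySem.List.enumerate p 0).foldl (fun d q => d.setdefault q.2 q.1)
        (PySem.Dict.empty : PySem.Dict String Int)).getD x (p.length : Int)
      = pvIdxD p x := by
  rw [PySem.Dict.getD_eq_get?_getD, pvPos_get? p 0 _ x]
  simp [pvIdxD, PySem.Dict.get?_empty]

-- the defaulted index never exceeds p.length
theorem pvIdxD_le (p : List String) (x : String) : pvIdxD p x ≤ (p.length : Int) := by
  unfold pvIdxD
  cases h : PySem.List.index? p x with
  | none => simp
  | some k =>
      obtain ⟨hk, _, _⟩ := PySem.List.getElem_of_index?_eq_some h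
      simp
      omega

-- every model that passes pvQ sits at or after the first passing position
theorem pv_findIdx_le_idxD (installed : List String) (p : List String) (x : String)
    (hx : pvQ installed x = true) : ((p.findIdx (pvQ installed) : Nat) : Int) ≤ pvIdxD p x := by
  unfold pvIdxD
  cases h : PySem.List.index? p x with
  | none => simpa using Int.ofNat_le.mpr List.findIdx_le_length
  | some k =>
      obtain ⟨hk, hxk, _⟩ := PySem.List.getElem_of_index?_eq_some h
      have : p.findIdx (pvQ installed) ≤ k := by
        by_contra hlt
        have := List.not_of_lt_findIdx (p := pvQ installed) (Nat.lt_of_not_le hlt)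
        have hfalse : pvQ installed x = false := by rw [← hxk]; exact this
        rw [hx] at hfalse
        simp at hfalse
      simpa using Int.ofNat_le.mpr this
-- x occurs at position j, so its first occurrence is at or before j
theorem pv_idxD_le_of_getElem (p : List String) (j : Nat) (hj : j < p.length) :
    pvIdxD p p[j] ≤ (j : Int) := by
  unfold pvIdxD
  have hmem : p[j] ∈ p := List.getElem_mem hj
  cases h : PySem.List.index? p p[j] with
  | none => exact absurd ((PySem.List.index?_eq_none_iff _ _).mp h) (by simp [hmem])
  | some k =>
      obtain ⟨hk, _, hmin⟩ := PySem.List.getElem_of_index?_eq_some h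
      have : k ≤ j := by
        by_contra hlt
        exact hmin j (Nat.lt_of_not_le hlt) rfl
      simpa using Int.ofNat_le.mpr this

-- B's 'best' is exactly the first passing position (or p.length when none passes)
theorem pv_best_eq (installed : List String) (p : List String) :
    PySem.List.minD
        (installed.map (fun name => min (pvIdxD p name) (pvIdxD p (pvStripLatest name))))
        (fun x => x) (p.length : Int)
      = ((p.findIdx (pvQ installed) : Nat) : Int) := by
  set F := p.findIdx (pvQ installed) with hF
  set l := installed.map (fun name => min (pvIdxD p name) (pvIdxD p (pvStripLatest name))) with hl
  -- every element of l is ≥ F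
  have hge : ∀ y ∈ l, ((F : Nat) : Int) ≤ y := by
    intro y hy
    rw [hl, List.mem_map] at hy
    obtain ⟨name, hname, rfl⟩ := hy
    have h1 : pvQ installed name = true := by
      simp [pvQ, List.contains_eq_mem, hname]
    have h2 : pvQ installed (pvStripLatest name) = true := by
      rcases pvStrip_eq name (pvStripLatest name) rfl with hcase | hcase
      · simp [pvQ, List.contains_eq_mem]
        left; rw [← hcase] at *; exact hname
      · simp [pvQ, List.contains_eq_mem]
        right; rw [← hcase]; exact hname
    exact le_min (pv_findIdx_le_idxD installed p name h1)
      (pv_findIdx_le_idxD installed p (pvStripLatest name) h2)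
  unfold PySem.List.minD
  cases hm : PySem.List.min? l (fun x => x) with
  | none =>
      have hnil : l = [] := (PySem.List.min?_eq_none_iff _ _).mp hm
      have hinst : installed = [] := by
        rw [hl] at hnil; exact List.map_eq_nil_iff.mp hnil
      have : F = p.length := by
        rw [hF]
        exact List.findIdx_eq_length.mpr (fun x _ => by simp [pvQ, hinst])
      simp [this]
  | some m =>
      have hmem := PySem.List.min?_mem hm
      have hFm : ((F : Nat) : Int) ≤ m := hge m hmem
      have hmF : m ≤ ((F : Nat) : Int) := by
        by_cases hFl : F < p.length
        · -- the model at position F passes: some installed name reaches it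
          have hQ : pvQ installed p[F] = true := List.findIdx_getElem (w := hFl)
          simp only [pvQ, Bool.or_eq_true, List.contains_eq_mem, decide_eq_true_eq] at hQ
          have hidx : pvIdxD p p[F] ≤ (F : Int) := pv_idxD_le_of_getElem p F hFl
          rcases hQ with hQ | hQ
          · have hyl : min (pvIdxD p p[F]) (pvIdxD p (pvStripLatest p[F])) ∈ l := by
              rw [hl]; exact List.mem_map_of_mem hQ
            calc m ≤ _ := PySem.List.min?_isMin hm _ hyl
              _ ≤ pvIdxD p p[F] := min_le_left _ _
              _ ≤ _ := hidx
          · have hyl : min (pvIdxD p (p[F] ++ ":latest"))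
                (pvIdxD p (pvStripLatest (p[F] ++ ":latest"))) ∈ l := by
              rw [hl]; exact List.mem_map_of_mem hQ
            rw [pvStrip_append] at hyl
            calc m ≤ _ := PySem.List.min?_isMin hm _ hyl
              _ ≤ pvIdxD p p[F] := min_le_right _ _
              _ ≤ _ := hidx
        · -- nothing passes: every element of l is ≤ p.length = F
          have hFlen : F = p.length := Nat.le_antisymm List.findIdx_le_length (Nat.le_of_not_lt hFl)
          rw [hl, List.mem_map] at hmem
          obtain ⟨name, _, rfl⟩ := hmem
          rw [hFlen]
          exact le_trans (min_le_left _ _) (pvIdxD_le p name)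
      simpa using le_antisymm hmF hFm

-- ===== VERDICT (by name: the statement is the Claim_ definition above) =====
theorem pick_first_installed_py_spec : Claim_equal_pick_first_installed_py := by
  intro installed p f _
  unfold Spec_pick_first_installed_py pick_first_installed_py pick_first_installed_py_alt
  simp only
  rw [pvALoop_eq]
  have hpos : ∀ x, ((PySem.List.enumerate p 0).foldl (fun d q => d.setdefault q.2 q.1)
        (PySem.Dict.empty : PySem.Dict String Int)).getD x (p.length : Int) = pvIdxD p x :=
    fun x => pvPos_getD p x
  simp only [hpos]
  rw [pv_best_eq]
  set F := p.findIdx (pvQ installed) with hF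
  by_cases h : F < p.length
  · rw [dif_pos h, if_pos (by exact_mod_cast h)]
    congr 1
    rw [PySem.List.pyGetD_natCast]
    exact (List.getD_eq_getElem _ _ h).symm
  · rw [dif_neg h, if_neg (by omega)]
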